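-- pv_equiv track=rewrite | github.com/haykal24/backend-marathon | dataevent/a.py | order_output_with_image
-- ===== SOURCE A (Python) =====
-- def order_output_with_image(data: dict, image_filename: str) -> dict:
--     """
--     Sisipkan kolom 'image' di posisi pertama, lalu kunci lainnya dalam urutan yang konsisten
--     agar cocok untuk listing dan detail.
--     """
--     desired_order = [
--         "image", "judul", "isi_informasi", "benefit_peserta",
--         "lokasi", "kota", "tanggal_event", "kontak_event",
--         "biaya_registrasi", "kategori", "jenis_event"
--     ]
--     out = {}
--     out["image"] = image_filename  # first
--     for key in desired_order[1:]:
--         if key in data: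
--             out[key] = data[key]
--     # Tambahkan kunci sisa jika ada (untuk jaga-jaga)
--     for k, v in data.items():
--         if k not in out:
--             out[k] = v
--     return out
-- ===== SOURCE B (Python) =====
-- def order_output_with_image(data: dict, image_filename: str) -> dict:
--     """Bucket the keys by a precomputed priority index in ONE pass, then emit buckets in order."""
--     desired_order = [
--         "image", "judul", "isi_informasi", "benefit_peserta",
--         "lokasi", "kota", "tanggal_event", "kontak_event",
--         "biaya_registrasi", "kategori", "jenis_event"
--     ]
--     priority = {k: i for i, k in enumerate(desired_order)}
--     n = len(desired_order)
--     rest = [(priority.get(k, n), (k, v)) for k, v in data.items() if k != "image"]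
--     groups = {}
--     for p, kv in rest:
--         groups.setdefault(p, []).append(kv)
--     out = {"image": image_filename}
--     for i in range(1, n + 1):
--         for k, v in groups.get(i, []):
--             out[k] = v
--     return out
-- ===== Notes on version B (the rewrite author's own statement) =====
-- stated objective: alternative
-- what changed: Instead of A's two passes with membership tests (probe each desired key in the dict, then re-scan all items against the keys already emitted), B precomputes a priority index from desired_order, tags and buckets the non-image items in one pass over the dict, and emits the buckets in priority order.
import Mathlib
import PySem

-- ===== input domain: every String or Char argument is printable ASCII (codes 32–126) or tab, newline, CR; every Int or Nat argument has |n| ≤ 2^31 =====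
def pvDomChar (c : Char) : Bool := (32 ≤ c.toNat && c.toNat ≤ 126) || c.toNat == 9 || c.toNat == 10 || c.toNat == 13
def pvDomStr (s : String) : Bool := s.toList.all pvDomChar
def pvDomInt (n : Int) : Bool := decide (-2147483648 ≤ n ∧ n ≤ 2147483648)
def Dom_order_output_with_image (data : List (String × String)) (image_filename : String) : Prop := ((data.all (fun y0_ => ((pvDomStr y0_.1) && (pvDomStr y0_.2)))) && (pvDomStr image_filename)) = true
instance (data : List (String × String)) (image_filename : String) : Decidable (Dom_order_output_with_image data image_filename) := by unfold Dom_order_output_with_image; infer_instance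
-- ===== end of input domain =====

-- B reorders the keys by bucketing them once under a precomputed priority index instead of
-- A's two membership-testing passes; objective: alternative (same asymptotic cost here).

-- ===== PORT A =====

-- the literal desired_order list both Pythons define
def pvDesired : List String :=
  ["image", "judul", "isi_informasi", "benefit_peserta",
   "lokasi", "kota", "tanggal_event", "kontak_event",
   "biaya_registrasi", "kategori", "jenis_event"]

def order_output_with_image (data : List (String × String)) (image_filename : String) : List (String × String) :=
  let d : PySem.Dict String String := PySem.Dict.mk data
  -- out = {}; out["image"] = image_filename
  let out : PySem.Dict String String := (PySem.Dict.empty).insert "image" image_filename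
  -- for key in desired_order[1:]: if key in data: out[key] = data[key]
  let out := (PySem.List.slice pvDesired (some 1) none).foldl
      (fun out key => if d.contains key then out.insert key (d.getD key "") else out) out
  -- for k, v in data.items(): if k not in out: out[k] = v
  let out := d.items.foldl
      (fun out kv => if out.contains kv.1 then out else out.insert kv.1 kv.2) out
  out.items

-- ===== PORT B =====

-- priority = {k: i for i, k in enumerate(desired_order)}
def pvPriority : PySem.Dict String Int :=
  (PySem.List.enumerate pvDesired).foldl (fun d p => d.insert p.2 p.1) PySem.Dict.empty

def order_output_with_image_alt (data : List (String × String)) (image_filename : String) : List (String × String) :=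
  let n : Int := pvDesired.length
  -- rest = [(priority.get(k, n), (k, v)) for k, v in data.items() if k != "image"]
  let rest := ((PySem.Dict.mk data).items.filter (fun kv => kv.1 != "image")).map
      (fun kv => (pvPriority.getD kv.1 n, kv))
  -- groups = {}; for p, kv in rest: groups.setdefault(p, []).append(kv)
  let groups := rest.foldl (fun g p => g.modify p.1 [] (· ++ [p.2]))
      (PySem.Dict.empty : PySem.Dict Int (List (String × String)))
  -- out = {"image": image_filename}
  let out : PySem.Dict String String := (PySem.Dict.empty).insert "image" image_filename
  -- for i in range(1, n + 1): for k, v in groups.get(i, []): out[k] = v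
  let out := (PySem.List.pyRange 1 (n + 1)).foldl
      (fun out i => (groups.getD i []).foldl (fun out kv => out.insert kv.1 kv.2) out) out
  out.items

-- ===== PRECONDITION & SPEC =====
-- Pre_ excludes association lists with duplicate keys: they do not represent a Python dict
-- (both Pythons receive a dict, where duplicates cannot occur), so the ports' first-match /
-- overwrite behaviour on such lists is an artefact of the encoding.
def Pre_order_output_with_image (data : List (String × String)) (image_filename : String) : Prop :=
  (data.map Prod.fst).Nodup
instance (data : List (String × String)) (image_filename : String) : Decidable (Pre_order_output_with_image data image_filename) := by unfold Pre_order_output_with_image; infer_instance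

def pvWitness_order_output_with_image : (List (String × String)) × String :=
  ([("judul", "Marathon"), ("x", "y"), ("kota", "Bandung")], "img.png")

def Spec_order_output_with_image (data : List (String × String)) (image_filename : String) (out : List (String × String)) : Prop := out = order_output_with_image_alt data image_filename
instance (data : List (String × String)) (image_filename : String) (out : List (String × String)) : Decidable (Spec_order_output_with_image data image_filename out) := by unfold Spec_order_output_with_image; infer_instance

-- ===== CLAIM (what is proved, stated in full; the proofs are below) =====
def Claim_equal_order_output_with_image : Prop := ∀ (data : List (String × String)) (image_filename : String), Dom_order_output_with_image data image_filename → Pre_order_output_with_image data image_filename → Spec_order_output_with_image data image_filename (order_output_with_image data image_filename)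

-- ===== LEMMAS AND PROOFS =====

-- the common shape both ports reduce to: "image" first, then data's pairs bucketed by key
def pvCanon (data : List (String × String)) (img : String) : List (String × String) :=
  ("image", img) :: (pvDesired.tail.flatMap (fun s => data.filter (fun kv => kv.1 == s))
    ++ data.filter (fun kv => !(pvDesired.any (fun x => x == kv.1))))

lemma pv_dict_contains_items {ν : Type} (d : PySem.Dict String ν) (k : String) :
    d.contains k = d.items.any (fun p => p.1 == k) := by
  cases d; exact PySem.Dict.contains_mk _ _

lemma pv_insert_fresh_items (d : PySem.Dict String String) (k : String) (v : String)
    (h : d.contains k = false) : (d.insert k v).items = d.items ++ [(k, v)] := by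
  have := PySem.Dict.items_foldl_insert_fresh [(k, v)] Prod.fst Prod.snd d
    (by intro a ha; simp at ha; subst ha; exact h) (by simp)
  simpa using this

lemma pv_out0_items (img : String) :
    ((PySem.Dict.empty : PySem.Dict String String).insert "image" img).items
      = [("image", img)] := rfl

lemma pv_out0_contains (img a : String) :
    ((PySem.Dict.empty : PySem.Dict String String).insert "image" img).contains a
      = (a == "image") := by
  rw [PySem.Dict.contains_insert]
  simp [pv_dict_contains_items, PySem.Dict.empty]

-- the map-over-filter of a list as a flatten of per-element segments
lemma pv_filter_map_flatten {α β : Type} (p : α → Bool) (f : α → β) (l : List α) :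
    (l.filter p).map f = (l.map (fun x => if p x then [f x] else [])).flatten := by
  induction l with
  | nil => simp
  | cons a t ih => by_cases h : p a <;> simp [List.filter_cons, h, ih]

-- phase 2 of A: the skip-if-present loop appends exactly the not-yet-present pairs
lemma pv_phase2_items (l : List (String × String)) (out : PySem.Dict String String)
    (h : (l.map Prod.fst).Nodup) :
    (l.foldl (fun o kv => if o.contains kv.1 then o else o.insert kv.1 kv.2) out).items
      = out.items ++ l.filter (fun kv => !out.contains kv.1) := by
  revert h
  induction l generalizing out with
  | nil => intro h; simp
  | cons a t ih =>
    intro h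
    obtain ⟨k0, v0⟩ := a
    simp only [List.map_cons, List.nodup_cons] at h
    by_cases hc : out.contains k0 = true
    · simp only [List.foldl_cons]
      rw [if_pos hc, ih out h.2]
      simp [List.filter_cons, hc]
    · have hfresh := pv_insert_fresh_items out k0 v0 (by simpa using hc)
      have hcong : t.filter (fun kv => !(out.insert k0 v0).contains kv.1)
          = t.filter (fun kv => !out.contains kv.1) := by
        apply List.filter_congr
        intro kv hkv
        have hne : kv.1 ≠ k0 := by
          intro he; exact h.1 (he ▸ List.mem_map_of_mem hkv)
        simp [PySem.Dict.contains_insert, hne]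
      simp only [List.foldl_cons]
      rw [if_neg hc, ih _ h.2, hfresh, hcong]
      simp [List.filter_cons, hc]

-- with unique keys, filtering data by one key is the singleton the dict lookup finds
lemma pv_filter_key_eq (data : List (String × String)) (h : (data.map Prod.fst).Nodup)
    (ki : String) :
    data.filter (fun kv => kv.1 == ki)
      = if (data.any fun p => p.1 == ki)
          then [(ki, (PySem.Dict.mk data).getD ki "")] else [] := by
  revert h
  induction data with
  | nil => intro h; simp
  | cons a t ih =>
    intro h
    obtain ⟨k0, v0⟩ := a
    simp only [List.map_cons, List.nodup_cons] at h
    by_cases hk : k0 = ki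
    · have ht : t.filter (fun kv => kv.1 == ki) = [] := by
        rw [List.filter_eq_nil_iff]
        intro kv hkv
        simp only [beq_iff_eq]
        intro he
        exact h.1 (hk ▸ he ▸ List.mem_map_of_mem hkv)
      subst hk
      simp [List.filter_cons, ht, PySem.Dict.getD, PySem.Dict.get?_mk_cons]
    · have hrec := ih h.2
      have hb : (k0 == ki) = false := by simpa using hk
      simp only [List.filter_cons, hb, Bool.false_eq_true, if_false]
      rw [hrec]
      have hcond : (((k0, v0) :: t).any fun p => p.1 == ki) = (t.any fun p => p.1 == ki) := by
        simp [List.any_cons, hb]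
      have hget : (PySem.Dict.mk ((k0, v0) :: t)).getD ki ""
          = (PySem.Dict.mk t).getD ki "" := by
        simp [PySem.Dict.getD, PySem.Dict.get?_mk_cons, hk]
      rw [hcond, hget]

-- evaluated priority dict
lemma pv_priority_eval : pvPriority = PySem.Dict.mk
    [("image", 0), ("judul", 1), ("isi_informasi", 2), ("benefit_peserta", 3),
     ("lokasi", 4), ("kota", 5), ("tanggal_event", 6), ("kontak_event", 7),
     ("biaya_registrasi", 8), ("kategori", 9), ("jenis_event", 10)] := rfl

lemma pv_getD_eq (d : PySem.Dict String Int) (k : String) (d0 : Int) :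
    d.getD k d0 = (d.get? k).getD d0 := rfl

lemma pv_len_eq : ((pvDesired.length : Nat) : Int) = (11 : Int) := rfl

lemma pv_get?_nil (k : String) :
    ({ items := [] } : PySem.Dict String Int).get? k = none := rfl

lemma pv_chain1 (k : String) : ((pvPriority.getD k (11 : Int) == (1 : Int)) && (k != "image")) = (k == "judul") := by
  rw [pv_priority_eval, pv_getD_eq]
  rw [PySem.Dict.get?_mk_cons]
  cases h1 : ("image" == k) with
  | true => have hsub := eq_of_beq h1; subst hsub; decide
  | false =>
  rw [if_neg (by simp [h1])]
  rw [PySem.Dict.get?_mk_cons]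
  cases h2 : ("judul" == k) with
  | true => have hsub := eq_of_beq h2; subst hsub; decide
  | false =>
  rw [if_neg (by simp [h2])]
  rw [PySem.Dict.get?_mk_cons]
  cases h3 : ("isi_informasi" == k) with
  | true => have hsub := eq_of_beq h3; subst hsub; decide
  | false =>
  rw [if_neg (by simp [h3])]
  rw [PySem.Dict.get?_mk_cons]
  cases h4 : ("benefit_peserta" == k) with
  | true => have hsub := eq_of_beq h4; subst hsub; decide
  | false =>
  rw [if_neg (by simp [h4])]
  rw [PySem.Dict.get?_mk_cons]
  cases h5 : ("lokasi" == k) with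
  | true => have hsub := eq_of_beq h5; subst hsub; decide
  | false =>
  rw [if_neg (by simp [h5])]
  rw [PySem.Dict.get?_mk_cons]
  cases h6 : ("kota" == k) with
  | true => have hsub := eq_of_beq h6; subst hsub; decide
  | false =>
  rw [if_neg (by simp [h6])]
  rw [PySem.Dict.get?_mk_cons]
  cases h7 : ("tanggal_event" == k) with
  | true => have hsub := eq_of_beq h7; subst hsub; decide
  | false =>
  rw [if_neg (by simp [h7])]
  rw [PySem.Dict.get?_mk_cons]
  cases h8 : ("kontak_event" == k) with
  | true => have hsub := eq_of_beq h8; subst hsub; decide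
  | false =>
  rw [if_neg (by simp [h8])]
  rw [PySem.Dict.get?_mk_cons]
  cases h9 : ("biaya_registrasi" == k) with
  | true => have hsub := eq_of_beq h9; subst hsub; decide
  | false =>
  rw [if_neg (by simp [h9])]
  rw [PySem.Dict.get?_mk_cons]
  cases h10 : ("kategori" == k) with
  | true => have hsub := eq_of_beq h10; subst hsub; decide
  | false =>
  rw [if_neg (by simp [h10])]
  rw [PySem.Dict.get?_mk_cons]
  cases h11 : ("jenis_event" == k) with
  | true => have hsub := eq_of_beq h11; subst hsub; decide
  | false =>
  rw [if_neg (by simp [h11])]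
  have hki : (k == "judul") = false :=
    beq_eq_false_iff_ne.mpr (fun he => by simp [he] at h2)
  simp [pv_get?_nil, hki]

lemma pv_chain2 (k : String) : ((pvPriority.getD k (11 : Int) == (2 : Int)) && (k != "image")) = (k == "isi_informasi") := by
  rw [pv_priority_eval, pv_getD_eq]
  rw [PySem.Dict.get?_mk_cons]
  cases h1 : ("image" == k) with
  | true => have hsub := eq_of_beq h1; subst hsub; decide
  | false =>
  rw [if_neg (by simp [h1])]
  rw [PySem.Dict.get?_mk_cons]
  cases h2 : ("judul" == k) with
  | true => have hsub := eq_of_beq h2; subst hsub; decide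
  | false =>
  rw [if_neg (by simp [h2])]
  rw [PySem.Dict.get?_mk_cons]
  cases h3 : ("isi_informasi" == k) with
  | true => have hsub := eq_of_beq h3; subst hsub; decide
  | false =>
  rw [if_neg (by simp [h3])]
  rw [PySem.Dict.get?_mk_cons]
  cases h4 : ("benefit_peserta" == k) with
  | true => have hsub := eq_of_beq h4; subst hsub; decide
  | false =>
  rw [if_neg (by simp [h4])]
  rw [PySem.Dict.get?_mk_cons]
  cases h5 : ("lokasi" == k) with
  | true => have hsub := eq_of_beq h5; subst hsub; decide
  | false =>
  rw [if_neg (by simp [h5])]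
  rw [PySem.Dict.get?_mk_cons]
  cases h6 : ("kota" == k) with
  | true => have hsub := eq_of_beq h6; subst hsub; decide
  | false =>
  rw [if_neg (by simp [h6])]
  rw [PySem.Dict.get?_mk_cons]
  cases h7 : ("tanggal_event" == k) with
  | true => have hsub := eq_of_beq h7; subst hsub; decide
  | false =>
  rw [if_neg (by simp [h7])]
  rw [PySem.Dict.get?_mk_cons]
  cases h8 : ("kontak_event" == k) with
  | true => have hsub := eq_of_beq h8; subst hsub; decide
  | false =>
  rw [if_neg (by simp [h8])]
  rw [PySem.Dict.get?_mk_cons]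
  cases h9 : ("biaya_registrasi" == k) with
  | true => have hsub := eq_of_beq h9; subst hsub; decide
  | false =>
  rw [if_neg (by simp [h9])]
  rw [PySem.Dict.get?_mk_cons]
  cases h10 : ("kategori" == k) with
  | true => have hsub := eq_of_beq h10; subst hsub; decide
  | false =>
  rw [if_neg (by simp [h10])]
  rw [PySem.Dict.get?_mk_cons]
  cases h11 : ("jenis_event" == k) with
  | true => have hsub := eq_of_beq h11; subst hsub; decide
  | false =>
  rw [if_neg (by simp [h11])]
  have hki : (k == "isi_informasi") = false :=
    beq_eq_false_iff_ne.mpr (fun he => by simp [he] at h3)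
  simp [pv_get?_nil, hki]

lemma pv_chain3 (k : String) : ((pvPriority.getD k (11 : Int) == (3 : Int)) && (k != "image")) = (k == "benefit_peserta") := by
  rw [pv_priority_eval, pv_getD_eq]
  rw [PySem.Dict.get?_mk_cons]
  cases h1 : ("image" == k) with
  | true => have hsub := eq_of_beq h1; subst hsub; decide
  | false =>
  rw [if_neg (by simp [h1])]
  rw [PySem.Dict.get?_mk_cons]
  cases h2 : ("judul" == k) with
  | true => have hsub := eq_of_beq h2; subst hsub; decide
  | false =>
  rw [if_neg (by simp [h2])]
  rw [PySem.Dict.get?_mk_cons]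
  cases h3 : ("isi_informasi" == k) with
  | true => have hsub := eq_of_beq h3; subst hsub; decide
  | false =>
  rw [if_neg (by simp [h3])]
  rw [PySem.Dict.get?_mk_cons]
  cases h4 : ("benefit_peserta" == k) with
  | true => have hsub := eq_of_beq h4; subst hsub; decide
  | false =>
  rw [if_neg (by simp [h4])]
  rw [PySem.Dict.get?_mk_cons]
  cases h5 : ("lokasi" == k) with
  | true => have hsub := eq_of_beq h5; subst hsub; decide
  | false =>
  rw [if_neg (by simp [h5])]
  rw [PySem.Dict.get?_mk_cons]
  cases h6 : ("kota" == k) with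
  | true => have hsub := eq_of_beq h6; subst hsub; decide
  | false =>
  rw [if_neg (by simp [h6])]
  rw [PySem.Dict.get?_mk_cons]
  cases h7 : ("tanggal_event" == k) with
  | true => have hsub := eq_of_beq h7; subst hsub; decide
  | false =>
  rw [if_neg (by simp [h7])]
  rw [PySem.Dict.get?_mk_cons]
  cases h8 : ("kontak_event" == k) with
  | true => have hsub := eq_of_beq h8; subst hsub; decide
  | false =>
  rw [if_neg (by simp [h8])]
  rw [PySem.Dict.get?_mk_cons]
  cases h9 : ("biaya_registrasi" == k) with
  | true => have hsub := eq_of_beq h9; subst hsub; decide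
  | false =>
  rw [if_neg (by simp [h9])]
  rw [PySem.Dict.get?_mk_cons]
  cases h10 : ("kategori" == k) with
  | true => have hsub := eq_of_beq h10; subst hsub; decide
  | false =>
  rw [if_neg (by simp [h10])]
  rw [PySem.Dict.get?_mk_cons]
  cases h11 : ("jenis_event" == k) with
  | true => have hsub := eq_of_beq h11; subst hsub; decide
  | false =>
  rw [if_neg (by simp [h11])]
  have hki : (k == "benefit_peserta") = false :=
    beq_eq_false_iff_ne.mpr (fun he => by simp [he] at h4)
  simp [pv_get?_nil, hki]

lemma pv_chain4 (k : String) : ((pvPriority.getD k (11 : Int) == (4 : Int)) && (k != "image")) = (k == "lokasi") := by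
  rw [pv_priority_eval, pv_getD_eq]
  rw [PySem.Dict.get?_mk_cons]
  cases h1 : ("image" == k) with
  | true => have hsub := eq_of_beq h1; subst hsub; decide
  | false =>
  rw [if_neg (by simp [h1])]
  rw [PySem.Dict.get?_mk_cons]
  cases h2 : ("judul" == k) with
  | true => have hsub := eq_of_beq h2; subst hsub; decide
  | false =>
  rw [if_neg (by simp [h2])]
  rw [PySem.Dict.get?_mk_cons]
  cases h3 : ("isi_informasi" == k) with
  | true => have hsub := eq_of_beq h3; subst hsub; decide
  | false =>
  rw [if_neg (by simp [h3])]
  rw [PySem.Dict.get?_mk_cons]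
  cases h4 : ("benefit_peserta" == k) with
  | true => have hsub := eq_of_beq h4; subst hsub; decide
  | false =>
  rw [if_neg (by simp [h4])]
  rw [PySem.Dict.get?_mk_cons]
  cases h5 : ("lokasi" == k) with
  | true => have hsub := eq_of_beq h5; subst hsub; decide
  | false =>
  rw [if_neg (by simp [h5])]
  rw [PySem.Dict.get?_mk_cons]
  cases h6 : ("kota" == k) with
  | true => have hsub := eq_of_beq h6; subst hsub; decide
  | false =>
  rw [if_neg (by simp [h6])]
  rw [PySem.Dict.get?_mk_cons]
  cases h7 : ("tanggal_event" == k) with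
  | true => have hsub := eq_of_beq h7; subst hsub; decide
  | false =>
  rw [if_neg (by simp [h7])]
  rw [PySem.Dict.get?_mk_cons]
  cases h8 : ("kontak_event" == k) with
  | true => have hsub := eq_of_beq h8; subst hsub; decide
  | false =>
  rw [if_neg (by simp [h8])]
  rw [PySem.Dict.get?_mk_cons]
  cases h9 : ("biaya_registrasi" == k) with
  | true => have hsub := eq_of_beq h9; subst hsub; decide
  | false =>
  rw [if_neg (by simp [h9])]
  rw [PySem.Dict.get?_mk_cons]
  cases h10 : ("kategori" == k) with
  | true => have hsub := eq_of_beq h10; subst hsub; decide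
  | false =>
  rw [if_neg (by simp [h10])]
  rw [PySem.Dict.get?_mk_cons]
  cases h11 : ("jenis_event" == k) with
  | true => have hsub := eq_of_beq h11; subst hsub; decide
  | false =>
  rw [if_neg (by simp [h11])]
  have hki : (k == "lokasi") = false :=
    beq_eq_false_iff_ne.mpr (fun he => by simp [he] at h5)
  simp [pv_get?_nil, hki]

lemma pv_chain5 (k : String) : ((pvPriority.getD k (11 : Int) == (5 : Int)) && (k != "image")) = (k == "kota") := by
  rw [pv_priority_eval, pv_getD_eq]
  rw [PySem.Dict.get?_mk_cons]
  cases h1 : ("image" == k) with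
  | true => have hsub := eq_of_beq h1; subst hsub; decide
  | false =>
  rw [if_neg (by simp [h1])]
  rw [PySem.Dict.get?_mk_cons]
  cases h2 : ("judul" == k) with
  | true => have hsub := eq_of_beq h2; subst hsub; decide
  | false =>
  rw [if_neg (by simp [h2])]
  rw [PySem.Dict.get?_mk_cons]
  cases h3 : ("isi_informasi" == k) with
  | true => have hsub := eq_of_beq h3; subst hsub; decide
  | false =>
  rw [if_neg (by simp [h3])]
  rw [PySem.Dict.get?_mk_cons]
  cases h4 : ("benefit_peserta" == k) with
  | true => have hsub := eq_of_beq h4; subst hsub; decide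
  | false =>
  rw [if_neg (by simp [h4])]
  rw [PySem.Dict.get?_mk_cons]
  cases h5 : ("lokasi" == k) with
  | true => have hsub := eq_of_beq h5; subst hsub; decide
  | false =>
  rw [if_neg (by simp [h5])]
  rw [PySem.Dict.get?_mk_cons]
  cases h6 : ("kota" == k) with
  | true => have hsub := eq_of_beq h6; subst hsub; decide
  | false =>
  rw [if_neg (by simp [h6])]
  rw [PySem.Dict.get?_mk_cons]
  cases h7 : ("tanggal_event" == k) with
  | true => have hsub := eq_of_beq h7; subst hsub; decide
  | false =>
  rw [if_neg (by simp [h7])]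
  rw [PySem.Dict.get?_mk_cons]
  cases h8 : ("kontak_event" == k) with
  | true => have hsub := eq_of_beq h8; subst hsub; decide
  | false =>
  rw [if_neg (by simp [h8])]
  rw [PySem.Dict.get?_mk_cons]
  cases h9 : ("biaya_registrasi" == k) with
  | true => have hsub := eq_of_beq h9; subst hsub; decide
  | false =>
  rw [if_neg (by simp [h9])]
  rw [PySem.Dict.get?_mk_cons]
  cases h10 : ("kategori" == k) with
  | true => have hsub := eq_of_beq h10; subst hsub; decide
  | false =>
  rw [if_neg (by simp [h10])]
  rw [PySem.Dict.get?_mk_cons]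
  cases h11 : ("jenis_event" == k) with
  | true => have hsub := eq_of_beq h11; subst hsub; decide
  | false =>
  rw [if_neg (by simp [h11])]
  have hki : (k == "kota") = false :=
    beq_eq_false_iff_ne.mpr (fun he => by simp [he] at h6)
  simp [pv_get?_nil, hki]

lemma pv_chain6 (k : String) : ((pvPriority.getD k (11 : Int) == (6 : Int)) && (k != "image")) = (k == "tanggal_event") := by
  rw [pv_priority_eval, pv_getD_eq]
  rw [PySem.Dict.get?_mk_cons]
  cases h1 : ("image" == k) with
  | true => have hsub := eq_of_beq h1; subst hsub; decide
  | false =>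
  rw [if_neg (by simp [h1])]
  rw [PySem.Dict.get?_mk_cons]
  cases h2 : ("judul" == k) with
  | true => have hsub := eq_of_beq h2; subst hsub; decide
  | false =>
  rw [if_neg (by simp [h2])]
  rw [PySem.Dict.get?_mk_cons]
  cases h3 : ("isi_informasi" == k) with
  | true => have hsub := eq_of_beq h3; subst hsub; decide
  | false =>
  rw [if_neg (by simp [h3])]
  rw [PySem.Dict.get?_mk_cons]
  cases h4 : ("benefit_peserta" == k) with
  | true => have hsub := eq_of_beq h4; subst hsub; decide
  | false =>
  rw [if_neg (by simp [h4])]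
  rw [PySem.Dict.get?_mk_cons]
  cases h5 : ("lokasi" == k) with
  | true => have hsub := eq_of_beq h5; subst hsub; decide
  | false =>
  rw [if_neg (by simp [h5])]
  rw [PySem.Dict.get?_mk_cons]
  cases h6 : ("kota" == k) with
  | true => have hsub := eq_of_beq h6; subst hsub; decide
  | false =>
  rw [if_neg (by simp [h6])]
  rw [PySem.Dict.get?_mk_cons]
  cases h7 : ("tanggal_event" == k) with
  | true => have hsub := eq_of_beq h7; subst hsub; decide
  | false =>
  rw [if_neg (by simp [h7])]
  rw [PySem.Dict.get?_mk_cons]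
  cases h8 : ("kontak_event" == k) with
  | true => have hsub := eq_of_beq h8; subst hsub; decide
  | false =>
  rw [if_neg (by simp [h8])]
  rw [PySem.Dict.get?_mk_cons]
  cases h9 : ("biaya_registrasi" == k) with
  | true => have hsub := eq_of_beq h9; subst hsub; decide
  | false =>
  rw [if_neg (by simp [h9])]
  rw [PySem.Dict.get?_mk_cons]
  cases h10 : ("kategori" == k) with
  | true => have hsub := eq_of_beq h10; subst hsub; decide
  | false =>
  rw [if_neg (by simp [h10])]
  rw [PySem.Dict.get?_mk_cons]
  cases h11 : ("jenis_event" == k) with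
  | true => have hsub := eq_of_beq h11; subst hsub; decide
  | false =>
  rw [if_neg (by simp [h11])]
  have hki : (k == "tanggal_event") = false :=
    beq_eq_false_iff_ne.mpr (fun he => by simp [he] at h7)
  simp [pv_get?_nil, hki]

lemma pv_chain7 (k : String) : ((pvPriority.getD k (11 : Int) == (7 : Int)) && (k != "image")) = (k == "kontak_event") := by
  rw [pv_priority_eval, pv_getD_eq]
  rw [PySem.Dict.get?_mk_cons]
  cases h1 : ("image" == k) with
  | true => have hsub := eq_of_beq h1; subst hsub; decide
  | false =>
  rw [if_neg (by simp [h1])]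
  rw [PySem.Dict.get?_mk_cons]
  cases h2 : ("judul" == k) with
  | true => have hsub := eq_of_beq h2; subst hsub; decide
  | false =>
  rw [if_neg (by simp [h2])]
  rw [PySem.Dict.get?_mk_cons]
  cases h3 : ("isi_informasi" == k) with
  | true => have hsub := eq_of_beq h3; subst hsub; decide
  | false =>
  rw [if_neg (by simp [h3])]
  rw [PySem.Dict.get?_mk_cons]
  cases h4 : ("benefit_peserta" == k) with
  | true => have hsub := eq_of_beq h4; subst hsub; decide
  | false =>
  rw [if_neg (by simp [h4])]
  rw [PySem.Dict.get?_mk_cons]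
  cases h5 : ("lokasi" == k) with
  | true => have hsub := eq_of_beq h5; subst hsub; decide
  | false =>
  rw [if_neg (by simp [h5])]
  rw [PySem.Dict.get?_mk_cons]
  cases h6 : ("kota" == k) with
  | true => have hsub := eq_of_beq h6; subst hsub; decide
  | false =>
  rw [if_neg (by simp [h6])]
  rw [PySem.Dict.get?_mk_cons]
  cases h7 : ("tanggal_event" == k) with
  | true => have hsub := eq_of_beq h7; subst hsub; decide
  | false =>
  rw [if_neg (by simp [h7])]
  rw [PySem.Dict.get?_mk_cons]
  cases h8 : ("kontak_event" == k) with
  | true => have hsub := eq_of_beq h8; subst hsub; decide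
  | false =>
  rw [if_neg (by simp [h8])]
  rw [PySem.Dict.get?_mk_cons]
  cases h9 : ("biaya_registrasi" == k) with
  | true => have hsub := eq_of_beq h9; subst hsub; decide
  | false =>
  rw [if_neg (by simp [h9])]
  rw [PySem.Dict.get?_mk_cons]
  cases h10 : ("kategori" == k) with
  | true => have hsub := eq_of_beq h10; subst hsub; decide
  | false =>
  rw [if_neg (by simp [h10])]
  rw [PySem.Dict.get?_mk_cons]
  cases h11 : ("jenis_event" == k) with
  | true => have hsub := eq_of_beq h11; subst hsub; decide
  | false =>
  rw [if_neg (by simp [h11])]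
  have hki : (k == "kontak_event") = false :=
    beq_eq_false_iff_ne.mpr (fun he => by simp [he] at h8)
  simp [pv_get?_nil, hki]

lemma pv_chain8 (k : String) : ((pvPriority.getD k (11 : Int) == (8 : Int)) && (k != "image")) = (k == "biaya_registrasi") := by
  rw [pv_priority_eval, pv_getD_eq]
  rw [PySem.Dict.get?_mk_cons]
  cases h1 : ("image" == k) with
  | true => have hsub := eq_of_beq h1; subst hsub; decide
  | false =>
  rw [if_neg (by simp [h1])]
  rw [PySem.Dict.get?_mk_cons]
  cases h2 : ("judul" == k) with
  | true => have hsub := eq_of_beq h2; subst hsub; decide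
  | false =>
  rw [if_neg (by simp [h2])]
  rw [PySem.Dict.get?_mk_cons]
  cases h3 : ("isi_informasi" == k) with
  | true => have hsub := eq_of_beq h3; subst hsub; decide
  | false =>
  rw [if_neg (by simp [h3])]
  rw [PySem.Dict.get?_mk_cons]
  cases h4 : ("benefit_peserta" == k) with
  | true => have hsub := eq_of_beq h4; subst hsub; decide
  | false =>
  rw [if_neg (by simp [h4])]
  rw [PySem.Dict.get?_mk_cons]
  cases h5 : ("lokasi" == k) with
  | true => have hsub := eq_of_beq h5; subst hsub; decide
  | false =>
  rw [if_neg (by simp [h5])]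
  rw [PySem.Dict.get?_mk_cons]
  cases h6 : ("kota" == k) with
  | true => have hsub := eq_of_beq h6; subst hsub; decide
  | false =>
  rw [if_neg (by simp [h6])]
  rw [PySem.Dict.get?_mk_cons]
  cases h7 : ("tanggal_event" == k) with
  | true => have hsub := eq_of_beq h7; subst hsub; decide
  | false =>
  rw [if_neg (by simp [h7])]
  rw [PySem.Dict.get?_mk_cons]
  cases h8 : ("kontak_event" == k) with
  | true => have hsub := eq_of_beq h8; subst hsub; decide
  | false =>
  rw [if_neg (by simp [h8])]
  rw [PySem.Dict.get?_mk_cons]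
  cases h9 : ("biaya_registrasi" == k) with
  | true => have hsub := eq_of_beq h9; subst hsub; decide
  | false =>
  rw [if_neg (by simp [h9])]
  rw [PySem.Dict.get?_mk_cons]
  cases h10 : ("kategori" == k) with
  | true => have hsub := eq_of_beq h10; subst hsub; decide
  | false =>
  rw [if_neg (by simp [h10])]
  rw [PySem.Dict.get?_mk_cons]
  cases h11 : ("jenis_event" == k) with
  | true => have hsub := eq_of_beq h11; subst hsub; decide
  | false =>
  rw [if_neg (by simp [h11])]
  have hki : (k == "biaya_registrasi") = false :=
    beq_eq_false_iff_ne.mpr (fun he => by simp [he] at h9)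
  simp [pv_get?_nil, hki]

lemma pv_chain9 (k : String) : ((pvPriority.getD k (11 : Int) == (9 : Int)) && (k != "image")) = (k == "kategori") := by
  rw [pv_priority_eval, pv_getD_eq]
  rw [PySem.Dict.get?_mk_cons]
  cases h1 : ("image" == k) with
  | true => have hsub := eq_of_beq h1; subst hsub; decide
  | false =>
  rw [if_neg (by simp [h1])]
  rw [PySem.Dict.get?_mk_cons]
  cases h2 : ("judul" == k) with
  | true => have hsub := eq_of_beq h2; subst hsub; decide
  | false =>
  rw [if_neg (by simp [h2])]
  rw [PySem.Dict.get?_mk_cons]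
  cases h3 : ("isi_informasi" == k) with
  | true => have hsub := eq_of_beq h3; subst hsub; decide
  | false =>
  rw [if_neg (by simp [h3])]
  rw [PySem.Dict.get?_mk_cons]
  cases h4 : ("benefit_peserta" == k) with
  | true => have hsub := eq_of_beq h4; subst hsub; decide
  | false =>
  rw [if_neg (by simp [h4])]
  rw [PySem.Dict.get?_mk_cons]
  cases h5 : ("lokasi" == k) with
  | true => have hsub := eq_of_beq h5; subst hsub; decide
  | false =>
  rw [if_neg (by simp [h5])]
  rw [PySem.Dict.get?_mk_cons]
  cases h6 : ("kota" == k) with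
  | true => have hsub := eq_of_beq h6; subst hsub; decide
  | false =>
  rw [if_neg (by simp [h6])]
  rw [PySem.Dict.get?_mk_cons]
  cases h7 : ("tanggal_event" == k) with
  | true => have hsub := eq_of_beq h7; subst hsub; decide
  | false =>
  rw [if_neg (by simp [h7])]
  rw [PySem.Dict.get?_mk_cons]
  cases h8 : ("kontak_event" == k) with
  | true => have hsub := eq_of_beq h8; subst hsub; decide
  | false =>
  rw [if_neg (by simp [h8])]
  rw [PySem.Dict.get?_mk_cons]
  cases h9 : ("biaya_registrasi" == k) with
  | true => have hsub := eq_of_beq h9; subst hsub; decide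
  | false =>
  rw [if_neg (by simp [h9])]
  rw [PySem.Dict.get?_mk_cons]
  cases h10 : ("kategori" == k) with
  | true => have hsub := eq_of_beq h10; subst hsub; decide
  | false =>
  rw [if_neg (by simp [h10])]
  rw [PySem.Dict.get?_mk_cons]
  cases h11 : ("jenis_event" == k) with
  | true => have hsub := eq_of_beq h11; subst hsub; decide
  | false =>
  rw [if_neg (by simp [h11])]
  have hki : (k == "kategori") = false :=
    beq_eq_false_iff_ne.mpr (fun he => by simp [he] at h10)
  simp [pv_get?_nil, hki]

lemma pv_chain10 (k : String) : ((pvPriority.getD k (11 : Int) == (10 : Int)) && (k != "image")) = (k == "jenis_event") := by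
  rw [pv_priority_eval, pv_getD_eq]
  rw [PySem.Dict.get?_mk_cons]
  cases h1 : ("image" == k) with
  | true => have hsub := eq_of_beq h1; subst hsub; decide
  | false =>
  rw [if_neg (by simp [h1])]
  rw [PySem.Dict.get?_mk_cons]
  cases h2 : ("judul" == k) with
  | true => have hsub := eq_of_beq h2; subst hsub; decide
  | false =>
  rw [if_neg (by simp [h2])]
  rw [PySem.Dict.get?_mk_cons]
  cases h3 : ("isi_informasi" == k) with
  | true => have hsub := eq_of_beq h3; subst hsub; decide
  | false =>
  rw [if_neg (by simp [h3])]
  rw [PySem.Dict.get?_mk_cons]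
  cases h4 : ("benefit_peserta" == k) with
  | true => have hsub := eq_of_beq h4; subst hsub; decide
  | false =>
  rw [if_neg (by simp [h4])]
  rw [PySem.Dict.get?_mk_cons]
  cases h5 : ("lokasi" == k) with
  | true => have hsub := eq_of_beq h5; subst hsub; decide
  | false =>
  rw [if_neg (by simp [h5])]
  rw [PySem.Dict.get?_mk_cons]
  cases h6 : ("kota" == k) with
  | true => have hsub := eq_of_beq h6; subst hsub; decide
  | false =>
  rw [if_neg (by simp [h6])]
  rw [PySem.Dict.get?_mk_cons]
  cases h7 : ("tanggal_event" == k) with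
  | true => have hsub := eq_of_beq h7; subst hsub; decide
  | false =>
  rw [if_neg (by simp [h7])]
  rw [PySem.Dict.get?_mk_cons]
  cases h8 : ("kontak_event" == k) with
  | true => have hsub := eq_of_beq h8; subst hsub; decide
  | false =>
  rw [if_neg (by simp [h8])]
  rw [PySem.Dict.get?_mk_cons]
  cases h9 : ("biaya_registrasi" == k) with
  | true => have hsub := eq_of_beq h9; subst hsub; decide
  | false =>
  rw [if_neg (by simp [h9])]
  rw [PySem.Dict.get?_mk_cons]
  cases h10 : ("kategori" == k) with
  | true => have hsub := eq_of_beq h10; subst hsub; decide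
  | false =>
  rw [if_neg (by simp [h10])]
  rw [PySem.Dict.get?_mk_cons]
  cases h11 : ("jenis_event" == k) with
  | true => have hsub := eq_of_beq h11; subst hsub; decide
  | false =>
  rw [if_neg (by simp [h11])]
  have hki : (k == "jenis_event") = false :=
    beq_eq_false_iff_ne.mpr (fun he => by simp [he] at h11)
  simp [pv_get?_nil, hki]

lemma pv_chain11 (k : String) : ((pvPriority.getD k (11 : Int) == (11 : Int)) && (k != "image")) = !(pvDesired.any (fun x => x == k)) := by
  rw [pv_priority_eval, pv_getD_eq]
  rw [PySem.Dict.get?_mk_cons]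
  cases h1 : ("image" == k) with
  | true => have hsub := eq_of_beq h1; subst hsub; decide
  | false =>
  rw [if_neg (by simp [h1])]
  rw [PySem.Dict.get?_mk_cons]
  cases h2 : ("judul" == k) with
  | true => have hsub := eq_of_beq h2; subst hsub; decide
  | false =>
  rw [if_neg (by simp [h2])]
  rw [PySem.Dict.get?_mk_cons]
  cases h3 : ("isi_informasi" == k) with
  | true => have hsub := eq_of_beq h3; subst hsub; decide
  | false =>
  rw [if_neg (by simp [h3])]
  rw [PySem.Dict.get?_mk_cons]
  cases h4 : ("benefit_peserta" == k) with
  | true => have hsub := eq_of_beq h4; subst hsub; decide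
  | false =>
  rw [if_neg (by simp [h4])]
  rw [PySem.Dict.get?_mk_cons]
  cases h5 : ("lokasi" == k) with
  | true => have hsub := eq_of_beq h5; subst hsub; decide
  | false =>
  rw [if_neg (by simp [h5])]
  rw [PySem.Dict.get?_mk_cons]
  cases h6 : ("kota" == k) with
  | true => have hsub := eq_of_beq h6; subst hsub; decide
  | false =>
  rw [if_neg (by simp [h6])]
  rw [PySem.Dict.get?_mk_cons]
  cases h7 : ("tanggal_event" == k) with
  | true => have hsub := eq_of_beq h7; subst hsub; decide
  | false =>
  rw [if_neg (by simp [h7])]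
  rw [PySem.Dict.get?_mk_cons]
  cases h8 : ("kontak_event" == k) with
  | true => have hsub := eq_of_beq h8; subst hsub; decide
  | false =>
  rw [if_neg (by simp [h8])]
  rw [PySem.Dict.get?_mk_cons]
  cases h9 : ("biaya_registrasi" == k) with
  | true => have hsub := eq_of_beq h9; subst hsub; decide
  | false =>
  rw [if_neg (by simp [h9])]
  rw [PySem.Dict.get?_mk_cons]
  cases h10 : ("kategori" == k) with
  | true => have hsub := eq_of_beq h10; subst hsub; decide
  | false =>
  rw [if_neg (by simp [h10])]
  rw [PySem.Dict.get?_mk_cons]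
  cases h11 : ("jenis_event" == k) with
  | true => have hsub := eq_of_beq h11; subst hsub; decide
  | false =>
  rw [if_neg (by simp [h11])]
  have hkim : (k == "image") = false :=
    beq_eq_false_iff_ne.mpr (fun he => by simp [he] at h1)
  simp [pv_get?_nil, pvDesired, hkim, h1, h2, h3, h4, h5, h6, h7, h8, h9, h10, h11, bne]

-- each bucket of B's group dict is one key-filter of data
lemma pv_group (data : List (String × String)) (i : Int) :
    (((data.filter (fun kv => kv.1 != "image")).map
        (fun kv => (pvPriority.getD kv.1 (pvDesired.length : Int), kv))).foldl
      (fun g p => g.modify p.1 [] (· ++ [p.2]))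
      (PySem.Dict.empty : PySem.Dict Int (List (String × String)))).getD i []
    = data.filter (fun kv => (pvPriority.getD kv.1 (pvDesired.length : Int) == i) && (kv.1 != "image")) := by
  rw [PySem.Dict.getD_foldl_modify_append]
  simp [PySem.Dict.getD_empty, List.filter_map, List.filter_filter, Function.comp,
    List.map_map]
  simp [Function.comp_def]

-- keys of the bucketed output are unique (given unique data keys)
lemma pv_nodup_segs (data : List (String × String)) (h : (data.map Prod.fst).Nodup)
    (keys : List String) (hk : keys.Nodup) (hsub : ∀ s ∈ keys, s ∈ pvDesired) :
    (((keys.flatMap (fun s => data.filter (fun kv => kv.1 == s)))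
        ++ data.filter (fun kv => !(pvDesired.any (fun x => x == kv.1)))).map Prod.fst).Nodup := by
  induction keys with
  | nil =>
    simp only [List.flatMap_nil, List.nil_append]
    exact List.Nodup.sublist (List.filter_sublist.map Prod.fst) h
  | cons s ks ih =>
    have hrest := ih hk.of_cons (fun x hx => hsub x (List.mem_cons_of_mem _ hx))
    rw [List.flatMap_cons, List.append_assoc, List.map_append, List.nodup_append]
    refine ⟨List.Nodup.sublist (List.filter_sublist.map Prod.fst) h, hrest, ?_⟩
    intro a ha b hb hab
    subst hab
    obtain ⟨kv, hkv, rfl⟩ := List.mem_map.mp ha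
    have hkey : kv.1 = s := by
      have := (List.mem_filter.mp hkv).2; simpa using this
    obtain ⟨kv', hkv', hkey'⟩ := List.mem_map.mp hb
    rcases List.mem_append.mp hkv' with hin | hin
    · obtain ⟨s', hs', hfil⟩ := List.mem_flatMap.mp hin
      have hkey2 : kv'.1 = s' := by
        have := (List.mem_filter.mp hfil).2; simpa using this
      have hss : s = s' := by rw [← hkey, ← hkey2, hkey']
      exact (List.nodup_cons.mp hk).1 (hss ▸ hs')
    · have hno : (pvDesired.any (fun x => x == kv'.1)) = false := by
        have := (List.mem_filter.mp hin).2; simpa using this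
      have hsP : s ∈ pvDesired := hsub s List.mem_cons_self
      have hany : (pvDesired.any (fun x => x == kv'.1)) = true := by
        rw [List.any_eq_true]
        exact ⟨s, hsP, by simp [hkey', hkey]⟩
      simp [hany] at hno

-- every bucketed pair has a key other than "image"
lemma pv_fresh_segs (data : List (String × String)) (keys : List String)
    (himg : "image" ∉ keys) (kv : String × String)
    (hkv : kv ∈ (keys.flatMap (fun s => data.filter (fun kv => kv.1 == s)))
        ++ data.filter (fun kv => !(pvDesired.any (fun x => x == kv.1)))) :
    (kv.1 == "image") = false := by
  rcases List.mem_append.mp hkv with hin | hin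
  · obtain ⟨s, hs, hfil⟩ := List.mem_flatMap.mp hin
    have hkey : kv.1 = s := by
      have := (List.mem_filter.mp hfil).2; simpa using this
    simp only [beq_eq_false_iff_ne, ne_eq, hkey]
    intro he; exact himg (he ▸ hs)
  · have hno : (pvDesired.any (fun x => x == kv.1)) = false := by
      have := (List.mem_filter.mp hin).2; simpa using this
    simp only [beq_eq_false_iff_ne, ne_eq]
    intro he
    have hany : (pvDesired.any (fun x => x == kv.1)) = true := by
      rw [List.any_eq_true]
      exact ⟨"image", by simp [pvDesired], by simp [he]⟩
    simp [hany] at hno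

-- ===== A reduces to the canonical shape =====
lemma pv_A_eq (data : List (String × String)) (img : String)
    (h : (data.map Prod.fst).Nodup) :
    order_output_with_image data img = pvCanon data img := by
  simp only [order_output_with_image]
  rw [show PySem.List.slice pvDesired (some 1) none = pvDesired.tail from by decide]
  rw [← List.foldl_filter (p := fun key => (PySem.Dict.mk data).contains key)
      (f := fun (o : PySem.Dict String String) k => o.insert k ((PySem.Dict.mk data).getD k ""))]
  rw [pv_phase2_items data _ h]
  have hfresh : ∀ a ∈ pvDesired.tail.filter (fun key => (PySem.Dict.mk data).contains key),
      ((PySem.Dict.empty : PySem.Dict String String).insert "image" img).contains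
        ((fun (key : String) => key) a) = false := by
    intro a ha
    have hmem : a ∈ pvDesired.tail := (List.mem_filter.mp ha).1
    have hni : "image" ∉ pvDesired.tail := by decide
    rw [pv_out0_contains]
    simp only [beq_eq_false_iff_ne, ne_eq]
    intro he; exact hni (he ▸ hmem)
  have hnd : ((pvDesired.tail.filter (fun key => (PySem.Dict.mk data).contains key)).map
      (fun (key : String) => key)).Nodup := by
    rw [List.map_id']
    exact (by decide : pvDesired.tail.Nodup).filter _
  have h1 := PySem.Dict.items_foldl_insert_fresh
      (pvDesired.tail.filter (fun key => (PySem.Dict.mk data).contains key))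
      (fun (key : String) => key)
      (fun (key : String) => (PySem.Dict.mk data).getD key "")
      ((PySem.Dict.empty : PySem.Dict String String).insert "image" img) hfresh hnd
  simp only [pv_out0_items, List.singleton_append] at h1
  simp only [pv_dict_contains_items] at h1 ⊢
  rw [h1]
  have hcong : data.filter (fun kv =>
        !((("image", img) :: (pvDesired.tail.filter (fun key => data.any fun p => p.1 == key)).map
              (fun key => (key, (PySem.Dict.mk data).getD key ""))).any (fun p => p.1 == kv.1)))
      = data.filter (fun kv => !(pvDesired.any (fun x => x == kv.1))) := by
    apply List.filter_congr
    intro kv hkv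
    have hmemd : (data.any fun p => p.1 == kv.1) = true := by
      rw [List.any_eq_true]
      exact ⟨kv, hkv, by simp⟩
    simp only [List.any_cons, List.any_map, Function.comp_def]
    rw [List.any_filter]
    have hfun : (fun (a : String) =>
          (data.any fun p => p.1 == a) && (a == kv.1))
        = fun (a : String) => (a == kv.1) := by
      funext a
      by_cases he : (a == kv.1) = true
      · have ha : a = kv.1 := by simpa using he
        subst ha
        simp [hmemd]
      · simp only [Bool.not_eq_true] at he
        simp [he]
    rw [hfun]
    rfl
  rw [hcong]
  have hP1 : (pvDesired.tail.filter (fun key => data.any fun p => p.1 == key)).map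
        (fun key => (key, (PySem.Dict.mk data).getD key ""))
      = pvDesired.tail.flatMap (fun s => data.filter (fun kv => kv.1 == s)) := by
    rw [pv_filter_map_flatten]
    rw [List.flatMap_def]
    congr 1
    apply List.map_congr_left
    intro s _
    rw [pv_filter_key_eq data h s]
  rw [hP1]
  simp [pvCanon]

-- ===== B reduces to the canonical shape =====
lemma pv_B_eq (data : List (String × String)) (img : String)
    (h : (data.map Prod.fst).Nodup) :
    order_output_with_image_alt data img = pvCanon data img := by
  simp only [order_output_with_image_alt]
  rw [show PySem.List.pyRange 1 ((pvDesired.length : Int) + 1)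
      = [1, 2, 3, 4, 5, 6, 7, 8, 9, 10, 11] from by decide]
  simp only [List.foldl_cons, List.foldl_nil]
  simp only [pv_group]
  simp only [pv_len_eq]
  simp only [pv_chain1, pv_chain2, pv_chain3, pv_chain4, pv_chain5, pv_chain6, pv_chain7,
    pv_chain8, pv_chain9, pv_chain10, pv_chain11]
  simp only [← List.foldl_append]
  have hL : data.filter (fun kv => kv.1 == "judul") ++ data.filter (fun kv => kv.1 == "isi_informasi")
        ++ data.filter (fun kv => kv.1 == "benefit_peserta") ++ data.filter (fun kv => kv.1 == "lokasi")
        ++ data.filter (fun kv => kv.1 == "kota") ++ data.filter (fun kv => kv.1 == "tanggal_event")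
        ++ data.filter (fun kv => kv.1 == "kontak_event") ++ data.filter (fun kv => kv.1 == "biaya_registrasi")
        ++ data.filter (fun kv => kv.1 == "kategori") ++ data.filter (fun kv => kv.1 == "jenis_event")
        ++ data.filter (fun kv => !(pvDesired.any (fun x => x == kv.1)))
      = (["judul", "isi_informasi", "benefit_peserta", "lokasi", "kota", "tanggal_event",
          "kontak_event", "biaya_registrasi", "kategori", "jenis_event"].flatMap
            (fun s => data.filter (fun kv => kv.1 == s)))
        ++ data.filter (fun kv => !(pvDesired.any (fun x => x == kv.1))) := by
    simp [List.flatMap_cons, List.flatMap_nil, List.append_assoc]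
  rw [hL]
  have hfre : ∀ a ∈ (["judul", "isi_informasi", "benefit_peserta", "lokasi", "kota", "tanggal_event",
          "kontak_event", "biaya_registrasi", "kategori", "jenis_event"].flatMap
            (fun s => data.filter (fun kv => kv.1 == s)))
        ++ data.filter (fun kv => !(pvDesired.any (fun x => x == kv.1))),
      ((PySem.Dict.empty : PySem.Dict String String).insert "image" img).contains (Prod.fst a) = false := by
    intro a ha
    rw [pv_out0_contains]
    exact pv_fresh_segs data _ (by decide) a ha
  have hnd : ((((["judul", "isi_informasi", "benefit_peserta", "lokasi", "kota", "tanggal_event",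
          "kontak_event", "biaya_registrasi", "kategori", "jenis_event"].flatMap
            (fun s => data.filter (fun kv => kv.1 == s)))
        ++ data.filter (fun kv => !(pvDesired.any (fun x => x == kv.1))))).map Prod.fst).Nodup :=
    pv_nodup_segs data h _ (by decide) (by decide)
  rw [PySem.Dict.items_foldl_insert_fresh _ Prod.fst Prod.snd
      ((PySem.Dict.empty : PySem.Dict String String).insert "image" img) hfre hnd]
  simp [pv_out0_items, pvCanon, pvDesired]

-- ===== VERDICT (by name: the statement is the Claim_ definition above) =====
theorem order_output_with_image_spec : Claim_equal_order_output_with_image := by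
  intro data img _ hpre
  unfold Spec_order_output_with_image
  rw [pv_A_eq data img hpre, pv_B_eq data img hpre]
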